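-- pv_equiv track=rewrite | github.com/freebsd/freebsd-src | share/mk/meta2deps.py | target_spec_exts
-- ===== SOURCE A (Python) =====
-- def target_spec_exts(target_spec):
--     """return a list of dirdep extensions that could match target_spec"""
--
--     if target_spec.find(',') < 0:
--         return ['.'+target_spec]
--     w = target_spec.split(',')
--     n = len(w)
--     e = []
--     while n > 0:
--         e.append('.'+','.join(w[0:n]))
--         n -= 1
--     return e
-- ===== SOURCE B (Python) =====
-- def target_spec_exts(target_spec):
--     """return a list of dirdep extensions that could match target_spec"""
--
--     e = []
--     s = target_spec
--     while True:
--         e.append('.' + s)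
--         i = s.rfind(',')
--         if i < 0:
--             return e
--         s = s[:i]
-- ===== Notes on version B (the rewrite author's own statement) =====
-- stated objective: simpler
-- what changed: B drops the split-into-components list entirely: it repeatedly truncates the string itself at its last comma (rfind), emitting '.'+s each round, which also subsumes A's no-comma special case.
import Mathlib
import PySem

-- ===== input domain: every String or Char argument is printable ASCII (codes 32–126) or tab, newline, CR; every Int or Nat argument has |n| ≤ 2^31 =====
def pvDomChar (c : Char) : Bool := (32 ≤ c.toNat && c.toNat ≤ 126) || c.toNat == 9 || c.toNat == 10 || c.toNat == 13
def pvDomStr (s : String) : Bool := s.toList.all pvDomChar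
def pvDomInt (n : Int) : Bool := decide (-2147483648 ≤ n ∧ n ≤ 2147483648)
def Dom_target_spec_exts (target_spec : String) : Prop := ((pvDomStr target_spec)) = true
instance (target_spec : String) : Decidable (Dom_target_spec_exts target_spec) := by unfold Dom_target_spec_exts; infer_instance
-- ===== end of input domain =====

-- B drops A's split-list representation: it truncates the string at its last comma (rfind) each round.

-- ===== PORT A =====
-- the 'while n > 0: e.append('.'+','.join(w[0:n])); n -= 1' loop (counter n is a Nat; it starts at len(w))
def tseLoopA (w : List (List Char)) : Nat → List (List Char) → List (List Char)
  | 0, e => e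
  | Nat.succ m, e =>
      tseLoopA w m (e ++ ['.' :: PySem.Chars.join [','] (PySem.List.slice w (some 0) (some ((m + 1 : Nat) : Int)))])

def target_spec_exts (target_spec : String) : List String :=
  if PySem.Chars.find target_spec.toList [','] < 0 then
    [String.ofList ('.' :: target_spec.toList)]
  else
    let w := PySem.Chars.splitOn target_spec.toList [',']
    (tseLoopA w w.length []).map String.ofList

-- ===== PORT B =====
-- the 'while True: e.append('.'+s); i = s.rfind(','); if i < 0: return e; s = s[:i]' loop;
-- fuel (length+1) only makes the recursion structural — each truncation strictly shortens s
def tseLoopB : Nat → List Char → List (List Char) → List (List Char)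
  | 0, _, e => e
  | Nat.succ f, s, e =>
      let e' := e ++ ['.' :: s]
      let i := PySem.Chars.rfind s [',']
      if i < 0 then e'
      else tseLoopB f (PySem.List.slice s none (some i)) e'

def target_spec_exts_alt (target_spec : String) : List String :=
  (tseLoopB (target_spec.toList.length + 1) target_spec.toList []).map String.ofList

-- ===== PRECONDITION & SPEC =====
def Spec_target_spec_exts (target_spec : String) (out : List String) : Prop := out = target_spec_exts_alt target_spec
instance (target_spec : String) (out : List String) : Decidable (Spec_target_spec_exts target_spec out) := by unfold Spec_target_spec_exts; infer_instance

-- ===== CLAIM (what is proved, stated in full; the proofs are below) =====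
def Claim_equal_target_spec_exts : Prop := ∀ (target_spec : String), Dom_target_spec_exts target_spec → Spec_target_spec_exts target_spec (target_spec_exts target_spec)

-- ===== LEMMAS AND PROOFS =====

-- the split of l at every occurrence of c (reference form of Python's l.split(c))
def splitList (c : Char) : List Char → List (List Char)
  | [] => [[]]
  | a :: t => if a = c then [] :: splitList c t else (splitList c t).modifyHead (a :: ·)

theorem splitList_ne_nil (c : Char) (l : List Char) : splitList c l ≠ [] := by
  induction l with
  | nil => simp [splitList]
  | cons a t ih =>
    simp only [splitList]
    split_ifs
    · simp
    · cases h : splitList c t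
      · exact absurd h ih
      · simp

theorem splitOn_go_eq (c : Char) (fuel : Nat) (l cur : List Char) (acc : List (List Char))
    (h : l.length ≤ fuel) :
    PySem.Chars.splitOn.go [c] fuel l cur acc
      = acc.reverse ++ (splitList c l).modifyHead (cur.reverse ++ ·) := by
  induction fuel generalizing l cur acc with
  | zero =>
    have : l = [] := by cases l <;> simp_all
    subst this
    simp [PySem.Chars.splitOn.go, splitList]
  | succ f ih =>
    cases l with
    | nil => simp [PySem.Chars.splitOn.go, splitList]
    | cons a t =>
      have hpre : [c].isPrefixOf (a :: t) = (a == c) := by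
        simp [List.isPrefixOf, eq_comm]
      by_cases hac : a = c
      · subst hac
        simp only [PySem.Chars.splitOn.go, hpre, beq_self_eq_true, if_true]
        have hd : List.drop [a].length (a :: t) = t := by simp
        rw [hd, ih t [] (cur.reverse :: acc) (by simpa using Nat.le_of_succ_le_succ (by simpa using h))]
        cases hs : splitList a t <;> simp [splitList, hs]
      · simp only [PySem.Chars.splitOn.go, hpre]
        rw [if_neg (by simp [hac])]
        rw [ih t (a :: cur) acc (by simpa using Nat.le_of_succ_le_succ (by simpa using h))]
        cases hs : splitList c t with
        | nil => exact absurd hs (splitList_ne_nil c t)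
        | cons hd tl => simp [splitList, hac, hs]

theorem splitOn_eq (c : Char) (l : List Char) :
    PySem.Chars.splitOn l [c] = splitList c l := by
  have h := splitOn_go_eq c (l.length + 1) l [] [] (by omega)
  cases hs : splitList c l with
  | nil => exact absurd hs (splitList_ne_nil c l)
  | cons hd tl =>
    rw [hs] at h
    simpa [PySem.Chars.splitOn, hs] using h

theorem modifyHead_intercalate (sep : List Char) (xs : List (List Char)) (a : Char) (h : xs ≠ []) :
    List.intercalate sep (xs.modifyHead (a :: ·)) = a :: List.intercalate sep xs := by
  cases xs with
  | nil => simp at h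
  | cons hd tl => cases tl <;> simp [List.intercalate, List.intersperse]

theorem intercalate_splitList (c : Char) (l : List Char) :
    List.intercalate [c] (splitList c l) = l := by
  induction l with
  | nil => simp [splitList, List.intercalate]
  | cons a t ih =>
    simp only [splitList]
    split_ifs with hac
    · subst hac
      cases hs : splitList a t with
      | nil => exact absurd hs (splitList_ne_nil a t)
      | cons hd tl =>
        rw [hs] at ih
        simp [List.intercalate, List.intersperse] at ih ⊢
        cases tl <;> simp_all [List.intersperse]
    · rw [modifyHead_intercalate _ _ _ (splitList_ne_nil c t), ih]

theorem splitList_of_not_mem (c : Char) (l : List Char) (h : c ∉ l) : splitList c l = [l] := by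
  induction l with
  | nil => rfl
  | cons a t ih =>
    simp only [List.mem_cons, not_or] at h
    simp [splitList, Ne.symm, h.1, ih h.2]

theorem splitList_append_last (c : Char) (u v : List Char) (hv : c ∉ v) :
    splitList c (u ++ c :: v) = splitList c u ++ [v] := by
  induction u with
  | nil => simp [splitList, splitList_of_not_mem c v hv]
  | cons a u' ih =>
    simp only [List.cons_append, splitList, ih]
    split_ifs with hac
    · rfl
    · cases hs : splitList c u' with
      | nil => exact absurd hs (splitList_ne_nil c u')
      | cons hd tl => simp

theorem last_split (c : Char) (l : List Char) (h : c ∈ l) :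
    ∃ u v, l = u ++ c :: v ∧ c ∉ v := by
  induction l with
  | nil => simp at h
  | cons a t ih =>
    by_cases hm : c ∈ t
    · obtain ⟨u, v, rfl, hv⟩ := ih hm
      exact ⟨a :: u, v, rfl, hv⟩
    · have : a = c := by rcases List.mem_cons.mp h with h' | h' <;> simp_all
      exact ⟨[], t, by simp [this], hm⟩

-- rfind.go characterisation
theorem rfind_go_neg (s sub : List Char) (j : Nat)
    (h : ∀ i ≤ j, ¬ (sub.isPrefixOf (s.drop i) = true)) :
    PySem.Chars.rfind.go s sub j = -1 := by
  induction j with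
  | zero => simp [PySem.Chars.rfind.go]; simpa using h 0 (le_refl 0)
  | succ m ih =>
    have h1 := h (m + 1) (le_refl _)
    simp only [PySem.Chars.rfind.go]
    rw [if_neg h1]
    exact ih (fun i hi => h i (Nat.le_succ_of_le hi))

theorem rfind_go_pos (s sub : List Char) (j k : Nat)
    (hk : k ≤ j) (hpre : sub.isPrefixOf (s.drop k) = true)
    (hmax : ∀ i, k < i → i ≤ j → ¬ (sub.isPrefixOf (s.drop i) = true)) :
    PySem.Chars.rfind.go s sub j = k := by
  induction j with
  | zero =>
    interval_cases k
    simp only [List.drop_zero] at hpre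
    simp only [PySem.Chars.rfind.go]
    rw [if_pos hpre]
    simp
  | succ m ih =>
    by_cases hkj : k = m + 1
    · subst hkj
      simp only [PySem.Chars.rfind.go]
      rw [if_pos hpre]
    · have hk' : k ≤ m := by omega
      simp only [PySem.Chars.rfind.go]
      rw [if_neg (hmax (m+1) (by omega) (le_refl _))]
      exact ih hk' (fun i hi hle => hmax i hi (Nat.le_succ_of_le hle))

theorem singleton_isPrefixOf (c : Char) (xs : List Char) :
    [c].isPrefixOf xs = true ↔ xs.head? = some c := by
  cases xs with
  | nil => simp [List.isPrefixOf]
  | cons a t =>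
    simp only [List.isPrefixOf, List.head?_cons, Option.some.injEq, Bool.and_eq_true, beq_iff_eq]
    constructor
    · rintro ⟨h, -⟩; exact h.symm
    · rintro rfl; simp

theorem rfind_of_not_mem (c : Char) (l : List Char) (h : c ∉ l) :
    PySem.Chars.rfind l [c] = -1 := by
  apply rfind_go_neg
  intro i _ hpre
  rw [singleton_isPrefixOf] at hpre
  exact h (List.mem_of_mem_drop (List.mem_of_mem_head? hpre))

theorem rfind_of_last (c : Char) (u v : List Char) (hv : c ∉ v) :
    PySem.Chars.rfind (u ++ c :: v) [c] = u.length := by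
  apply rfind_go_pos
  · simp
  · rw [singleton_isPrefixOf, List.drop_left]
    simp
  · intro i hi _ hpre
    rw [singleton_isPrefixOf] at hpre
    have hdec : (u ++ c :: v).drop i = v.drop (i - (u.length + 1)) := by
      rw [show u ++ c :: v = (u ++ [c]) ++ v by simp, List.drop_append]
      rw [List.drop_eq_nil_of_le (by simp; omega)]
      simp
    rw [hdec] at hpre
    exact hv (List.mem_of_mem_drop (List.mem_of_mem_head? hpre))

-- common reference result: prefixes longest-to-shortest, '.'-prefixed
def tseRef (cs : List Char) : List (List Char) :=
  (List.range (splitList ',' cs).length).reverse.map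
    (fun m => '.' :: PySem.Chars.join [','] ((splitList ',' cs).take (m + 1)))

theorem tseLoopA_eq (w : List (List Char)) (n : Nat) (e : List (List Char)) :
    tseLoopA w n e
      = e ++ (List.range n).reverse.map
          (fun m => '.' :: PySem.Chars.join [','] (w.take (m + 1))) := by
  induction n generalizing e with
  | zero => simp [tseLoopA]
  | succ m ih =>
    rw [tseLoopA, ih, List.range_succ]
    have hb : PySem.List.slice w (some 0) (some ((m + 1 : Nat) : Int)) = w.take (m + 1) := by
      rw [PySem.List.slice_zero_start, PySem.List.slice_to_natCast]
    rw [hb]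
    simp

theorem join_take_all (cs : List Char) :
    PySem.Chars.join [','] ((splitList ',' cs).take (splitList ',' cs).length) = cs := by
  rw [List.take_length]
  simpa [PySem.Chars.join] using intercalate_splitList ',' cs

theorem tseRef_of_not_mem (cs : List Char) (h : (',' : Char) ∉ cs) :
    tseRef cs = [('.' :: cs)] := by
  simp [tseRef, splitList_of_not_mem ',' cs h, PySem.Chars.join, List.range_succ,
    List.intercalate, List.intersperse]

theorem tseRef_step (u v : List Char) (hv : (',' : Char) ∉ v) :
    tseRef (u ++ ',' :: v) = ('.' :: (u ++ ',' :: v)) :: tseRef u := by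
  have hsp := splitList_append_last ',' u v hv
  have hlen : (splitList ',' (u ++ ',' :: v)).length = (splitList ',' u).length + 1 := by
    rw [hsp]; simp
  unfold tseRef
  rw [hlen, List.range_succ]
  simp only [List.reverse_append, List.reverse_singleton, List.singleton_append, List.map_cons]
  congr 1
  · congr 1
    rw [← hlen, join_take_all]
  · apply List.map_congr_left
    intro m hm
    rw [List.mem_reverse, List.mem_range] at hm
    rw [hsp, List.take_append_of_le_length (by omega)]

theorem tseLoopB_eq (fuel : Nat) (cs : List Char) (e : List (List Char))
    (h : cs.length < fuel) :
    tseLoopB fuel cs e = e ++ tseRef cs := by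
  induction fuel generalizing cs e with
  | zero => omega
  | succ f ih =>
    by_cases hm : (',' : Char) ∈ cs
    · obtain ⟨u, v, rfl, hv⟩ := last_split ',' cs hm
      rw [tseLoopB]
      simp only [rfind_of_last ',' u v hv]
      rw [if_neg (by omega)]
      have hsl : PySem.List.slice (u ++ ',' :: v) none (some ((u.length : Nat) : Int)) = u := by
        rw [PySem.List.slice_to_natCast, List.take_left]
      rw [hsl, ih u _ (by simp at h ⊢; omega), tseRef_step u v hv]
      simp
    · rw [tseLoopB]
      simp only [rfind_of_not_mem ',' cs hm]
      rw [if_pos (by norm_num)]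
      rw [tseRef_of_not_mem cs hm]


theorem target_spec_exts_eq_ref (s : String) :
    target_spec_exts s = (tseRef s.toList).map String.ofList := by
  rw [target_spec_exts]
  split_ifs with hf
  · have hne : PySem.Chars.find s.toList [','] = -1 := by
      have := PySem.Chars.neg_one_le_find s.toList [',']
      omega
    have hnm : (',' : Char) ∉ s.toList := by
      intro hmem
      rw [PySem.Chars.find_eq_neg_one_iff] at hne
      exact hne ((List.singleton_infix_iff ',' s.toList).mpr hmem)
    rw [tseRef_of_not_mem _ hnm]
    simp
  · rw [splitOn_eq]
    show (tseLoopA (splitList ',' s.toList) (splitList ',' s.toList).length []).map String.ofList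
        = (tseRef s.toList).map String.ofList
    rw [tseLoopA_eq]
    simp [tseRef]

theorem target_spec_exts_alt_eq_ref (s : String) :
    target_spec_exts_alt s = (tseRef s.toList).map String.ofList := by
  rw [target_spec_exts_alt, tseLoopB_eq _ _ _ (by omega)]
  simp
-- ===== VERDICT (by name: the statement is the Claim_ definition above) =====
theorem target_spec_exts_spec : Claim_equal_target_spec_exts := by
  intro s _
  unfold Spec_target_spec_exts
  rw [target_spec_exts_eq_ref, target_spec_exts_alt_eq_ref]
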